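-- pv_equiv track=rewrite | github.com/simjhsim/hello-world | misc/project_euler/q35.py | pos_tuples
-- ===== SOURCE A (Python) =====
-- def pos_tuples(n,bound):
--     # creates list of all n-tuples of non-negative integers such that the sum of
--     # coordinates is < bound
--     if bound <= 0:
--         tup = []
--         for i in range(n):
--             tup.append(0)
--         return [tup]
--     elif n <= 0:
--         return []
--
--     comp_list = []
--
--     if n == 1:
--         for i in range(bound):
--             comp_list.append([i])
--     else:
--         for i in range(bound):
--             buff_list = pos_tuples(n-1,bound-i)
--             for x_tup in buff_list:
--                 comp_list.append([i]+x_tup)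
--
--     return comp_list
-- ===== SOURCE B (Python) =====
-- def pos_tuples(n, bound):
--     # creates list of all n-tuples of non-negative integers such that the sum of
--     # coordinates is < bound
--     if bound <= 0:
--         return [[0] * n]
--     if n <= 0:
--         return []
--     # iterative level-by-level construction: keep (prefix, remaining budget) pairs
--     level = [([], bound)]
--     for _ in range(n):
--         level = [(t + [i], r - i) for (t, r) in level for i in range(r)]
--     return [t for (t, _) in level]
-- ===== Notes on version B (the rewrite author's own statement) =====
-- stated objective: alternative
-- what changed: Replaces A's top-down recursion (recursing on n-1 with a shrinking bound and prepending the first coordinate) by an iterative breadth-wise construction that extends a single list of (prefix, remaining budget) pairs by one coordinate per loop pass.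
import Mathlib
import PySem

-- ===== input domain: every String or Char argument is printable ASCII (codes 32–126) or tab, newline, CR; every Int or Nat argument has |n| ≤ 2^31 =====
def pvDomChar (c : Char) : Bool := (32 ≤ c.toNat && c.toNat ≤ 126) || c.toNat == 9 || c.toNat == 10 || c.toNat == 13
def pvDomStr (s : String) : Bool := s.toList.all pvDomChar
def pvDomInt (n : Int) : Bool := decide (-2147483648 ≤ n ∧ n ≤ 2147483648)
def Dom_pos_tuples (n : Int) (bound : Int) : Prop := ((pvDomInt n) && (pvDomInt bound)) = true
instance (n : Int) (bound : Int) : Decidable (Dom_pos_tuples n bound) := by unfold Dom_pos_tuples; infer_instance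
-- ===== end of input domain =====

-- B replaces A's recursive descent by an iterative level-by-level construction that
-- carries (prefix, remaining budget) pairs; same return value, alternative structure.

-- ===== PORT A =====
def pos_tuples (n : Int) (bound : Int) : List (List Int) :=
  if bound ≤ 0 then
    -- tup = []; for i in range(n): tup.append(0); return [tup]
    [(PySem.List.pyRange 0 n 1).foldl (fun tup _ => tup ++ [(0 : Int)]) []]
  else if n ≤ 0 then
    []
  else if n = 1 then
    -- for i in range(bound): comp_list.append([i])
    (PySem.List.pyRange 0 bound 1).foldl (fun comp i => comp ++ [[i]]) []
  else
    -- for i in range(bound): for x_tup in pos_tuples(n-1, bound-i): comp_list.append([i]+x_tup)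
    (PySem.List.pyRange 0 bound 1).foldl
      (fun comp i => (pos_tuples (n - 1) (bound - i)).foldl (fun c x => c ++ [i :: x]) comp)
      []
termination_by n.toNat
decreasing_by omega

-- ===== PORT B =====
-- one loop iteration: [(t + [i], r - i) for (t, r) in level for i in range(r)]
def pvStep (level : List (List Int × Int)) : List (List Int × Int) :=
  level.flatMap (fun tr => (PySem.List.pyRange 0 tr.2 1).map (fun i => (tr.1 ++ [i], tr.2 - i)))

def pos_tuples_alt (n : Int) (bound : Int) : List (List Int) :=
  if bound ≤ 0 then
    [List.replicate n.toNat (0 : Int)]     -- [[0] * n]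
  else if n ≤ 0 then
    []
  else
    -- level = [([], bound)]; for _ in range(n): level = pvStep level; return [t for (t, _) in level]
    ((PySem.List.pyRange 0 n 1).foldl (fun level _ => pvStep level)
      [(([] : List Int), bound)]).map (·.1)

-- ===== PRECONDITION & SPEC =====
-- Pre_ excludes only the inputs with bound >= 1 and n >= 999, on which Python A's depth-n
-- recursion exceeds CPython's default recursion limit and raises RecursionError.
def Pre_pos_tuples (n : Int) (bound : Int) : Prop := bound ≤ 0 ∨ n ≤ 0 ∨ n ≤ 998
instance (n : Int) (bound : Int) : Decidable (Pre_pos_tuples n bound) := by unfold Pre_pos_tuples; infer_instance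
def pvWitness_pos_tuples : Int × Int := (2, 3)

def Spec_pos_tuples (n : Int) (bound : Int) (out : List (List Int)) : Prop := out = pos_tuples_alt n bound
instance (n : Int) (bound : Int) (out : List (List Int)) : Decidable (Spec_pos_tuples n bound out) := by unfold Spec_pos_tuples; infer_instance

-- ===== CLAIM (what is proved, stated in full; the proofs are below) =====
def Claim_equal_pos_tuples : Prop := ∀ (n : Int) (bound : Int), Dom_pos_tuples n bound → Pre_pos_tuples n bound → Spec_pos_tuples n bound (pos_tuples n bound)

-- ===== LEMMAS AND PROOFS =====

-- iterate pvStep k times (the loop, counted)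
def pvStepN : Nat → List (List Int × Int) → List (List Int × Int)
  | 0, L => L
  | k + 1, L => pvStepN k (pvStep L)

theorem pvFoldl_step (l : List Int) (L : List (List Int × Int)) :
    l.foldl (fun level _ => pvStep level) L = pvStepN l.length L := by
  induction l generalizing L with
  | nil => rfl
  | cons x xs ih => simp [List.foldl_cons, pvStepN, ih]

theorem pvStep_append (L1 L2 : List (List Int × Int)) :
    pvStep (L1 ++ L2) = pvStep L1 ++ pvStep L2 := by
  simp [pvStep]

theorem pvStepN_append (k : Nat) (L1 L2 : List (List Int × Int)) :
    pvStepN k (L1 ++ L2) = pvStepN k L1 ++ pvStepN k L2 := by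
  induction k generalizing L1 L2 with
  | zero => rfl
  | succ k ih => simp [pvStepN, pvStep_append, ih]

theorem pvStepN_nil (k : Nat) : pvStepN k [] = [] := by
  induction k with
  | zero => rfl
  | succ k ih => simp [pvStepN, pvStep, ih]

theorem pvFlatMap_congr_mem {α β : Type} {l : List α} {f g : α → List β}
    (h : ∀ x ∈ l, f x = g x) : l.flatMap f = l.flatMap g := by
  induction l with
  | nil => rfl
  | cons x xs ih =>
    simp only [List.flatMap_cons]
    rw [h x (by simp), ih (fun y hy => h y (by simp [hy]))]

theorem pvStepN_map {α : Type} (k : Nat) (l : List α) (f : α → List Int × Int) :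
    pvStepN k (l.map f) = l.flatMap (fun x => pvStepN k [f x]) := by
  induction l with
  | nil => simp [pvStepN_nil]
  | cons x xs ih =>
    have : (x :: xs).map f = [f x] ++ xs.map f := by simp
    rw [this, pvStepN_append, ih, List.flatMap_cons]

theorem pvStepN_shift (k : Nat) (t0 : List Int) (L : List (List Int × Int)) :
    pvStepN k (L.map (fun tr => (t0 ++ tr.1, tr.2))) =
      (pvStepN k L).map (fun tr => (t0 ++ tr.1, tr.2)) := by
  induction k generalizing L with
  | zero => rfl
  | succ k ih =>
    have hstep : pvStep (L.map (fun tr => (t0 ++ tr.1, tr.2))) =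
        (pvStep L).map (fun tr => (t0 ++ tr.1, tr.2)) := by
      simp [pvStep, List.flatMap_map, List.map_flatMap, List.map_map,
        List.append_assoc, Function.comp_def]
    simp [pvStepN, hstep, ih]

theorem pvStepN_single_shift (k : Nat) (i b : Int) :
    pvStepN k [([i], b)] =
      (pvStepN k [(([] : List Int), b)]).map (fun tr => (i :: tr.1, tr.2)) := by
  have h := pvStepN_shift k [i] [(([] : List Int), b)]
  simpa using h

-- the core invariant: A's recursion computes the first components of the iterated levels
theorem pvMain (k : Nat) : ∀ (n b : Int), n.toNat = k + 1 → 1 ≤ b →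
    pos_tuples n b = (pvStepN (k + 1) [(([] : List Int), b)]).map (·.1) := by
  induction k with
  | zero =>
    intro n b hn hb
    have hn1 : n = 1 := by omega
    subst hn1
    rw [pos_tuples]
    simp only [show ¬(b ≤ 0) by omega, if_false, show ¬((1:Int) ≤ 0) by omega, if_true]
    rw [PySem.List.foldl_append_singleton_eq_map (f := fun i => [i])]
    simp [pvStepN, pvStep, List.map_map, Function.comp]
  | succ k ih =>
    intro n b hn hb
    have hb0 : ¬ b ≤ 0 := by omega
    have hn0 : ¬ n ≤ 0 := by omega
    have hn1 : ¬ n = 1 := by omega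
    rw [pos_tuples]
    simp only [hb0, if_false, hn0, hn1]
    -- A side: inner append-loop is a map, outer loop a flatMap
    have hA : (PySem.List.pyRange 0 b 1).foldl
        (fun comp i => (pos_tuples (n - 1) (b - i)).foldl (fun c x => c ++ [i :: x]) comp) [] =
        (PySem.List.pyRange 0 b 1).flatMap
          (fun i => (pos_tuples (n - 1) (b - i)).map (fun x => i :: x)) := by
      rw [show (fun comp i => (pos_tuples (n - 1) (b - i)).foldl (fun c x => c ++ [i :: x]) comp)
            = (fun comp i => comp ++ (pos_tuples (n - 1) (b - i)).map (fun x => i :: x)) from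
          funext fun comp => funext fun i =>
            PySem.List.foldl_append_singleton_eq_map (f := fun x => i :: x)
              (pos_tuples (n - 1) (b - i)) comp]
      rw [PySem.List.foldl_append_eq_flatMap]
      simp
    rw [hA]
    -- B side: peel one pvStep, distribute pvStepN over the resulting map
    have hB : pvStepN (k + 1 + 1) [(([] : List Int), b)] =
        pvStepN (k + 1) ((PySem.List.pyRange 0 b 1).map (fun i => ([i], b - i))) := by
      simp [pvStepN, pvStep]
    rw [hB, pvStepN_map, List.map_flatMap]
    apply pvFlatMap_congr_mem
    intro i hi
    have hmem := (PySem.List.mem_pyRange_one.mp hi)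
    have hbi : 1 ≤ b - i := by omega
    have hnk : (n - 1).toNat = k + 1 := by omega
    rw [ih (n - 1) (b - i) hnk hbi, pvStepN_single_shift]
    simp [List.map_map, Function.comp]

-- ===== VERDICT (by name: the statement is the Claim_ definition above) =====
theorem pos_tuples_spec : Claim_equal_pos_tuples := by
  intro n bound _ _
  unfold Spec_pos_tuples pos_tuples_alt
  by_cases hb : bound ≤ 0
  · rw [pos_tuples]
    simp only [hb, if_true]
    rw [PySem.List.foldl_append_singleton_eq_map (f := fun _ => (0 : Int))]
    simp [PySem.List.length_pyRange_one]
  · by_cases hn : n ≤ 0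
    · rw [pos_tuples]; simp [hb, hn]
    · simp only [hb, if_false, hn]
      have h1n : (1:Int) ≤ n := by omega
      have h1b : (1:Int) ≤ bound := by omega
      rw [pvFoldl_step, PySem.List.length_pyRange_one]
      have hk : (n - 0).toNat = (n.toNat - 1) + 1 := by omega
      rw [hk]
      exact pvMain (n.toNat - 1) n bound (by omega) h1b
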